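-- pv_equiv track=rewrite | github.com/jennyzzt/LLM_debate_on_ARC | ARC_gen_agents2_rounds2_openai/a85d4709/agent0/algo.py | solve
-- ===== SOURCE A (Python) =====
-- def solve(input_grid):
--     # Initialize the output grid with zeros
--     output = [[0 for _ in range(len(input_grid[0]))] for _ in range(len(input_grid))]
--
--     # Function to count non-zero elements in a list
--     def count_non_zero(lst):
--         return sum(1 for x in lst if x != 0)
--
--     # Iterate through each cell in the input grid
--     for i in range(len(input_grid)):
--         for j in range(len(input_grid[0])):
--             # Count non-zero elements in the current row and column
--             row_count = count_non_zero(input_grid[i])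
--             col_count = count_non_zero([input_grid[x][j] for x in range(len(input_grid))])
--
--             # Calculate the value for the output grid cell
--             # Subtract 1 if the current cell is non-zero since it's counted in both row and column
--             output[i][j] = row_count + col_count - (1 if input_grid[i][j] != 0 else 0)
--
--     return output
-- ===== SOURCE B (Python) =====
-- def solve(input_grid):
--     if not input_grid:
--         return []
--     m = len(input_grid[0])
--     cols = [sum(1 for row in input_grid if row[j] != 0) for j in range(m)]
--     out = []
--     for row in input_grid:
--         rc = sum(1 for x in row if x != 0)
--         out.append([rc + cols[j] - (1 if row[j] != 0 else 0) for j in range(m)])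
--     return out
-- ===== Notes on version B (the rewrite author's own statement) =====
-- stated objective: faster
-- what changed: B precomputes the per-column non-zero counts once and each row's count once per row, then fills cells, instead of recounting the whole row and rebuilding+recounting the whole column for every cell.
import Mathlib
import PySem

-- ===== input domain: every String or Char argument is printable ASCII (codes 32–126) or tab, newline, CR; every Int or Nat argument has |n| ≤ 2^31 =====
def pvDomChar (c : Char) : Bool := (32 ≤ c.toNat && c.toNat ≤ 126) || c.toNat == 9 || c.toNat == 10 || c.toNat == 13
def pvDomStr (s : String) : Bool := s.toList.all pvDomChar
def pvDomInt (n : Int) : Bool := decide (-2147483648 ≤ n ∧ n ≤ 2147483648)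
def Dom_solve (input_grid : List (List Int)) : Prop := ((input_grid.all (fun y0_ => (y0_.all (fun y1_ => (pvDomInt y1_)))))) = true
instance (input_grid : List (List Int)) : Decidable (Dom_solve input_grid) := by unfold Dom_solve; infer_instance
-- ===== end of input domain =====

-- B computes the per-column non-zero counts once and each row's count once per row instead of recounting them at every cell (objective: faster).

-- ===== PORT A =====
-- helper `count_non_zero`: sum(1 for x in lst if x != 0)
def countNonZero (lst : List Int) : Int :=
  lst.foldl (fun a x => if x ≠ 0 then a + 1 else a) 0

-- the body of A's inner loop: row_count, col_count recomputed at every cell exactly as in the Python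
def cellValue (input_grid : List (List Int)) (i j : Nat) : Int :=
  let row_count := countNonZero (input_grid.getD i [])
  let col_count := countNonZero ((List.range input_grid.length).map (fun x => (input_grid.getD x []).getD j 0))
  row_count + col_count - (if (input_grid.getD i []).getD j 0 ≠ 0 then 1 else 0)

-- literal port of A: zero-initialized output, then output[i][j] assigned in the nested loops
def solve (input_grid : List (List Int)) : List (List Int) :=
  (List.range input_grid.length).foldl (fun out i =>
    (List.range (input_grid.headD []).length).foldl (fun out j =>
      out.modify i (fun r => r.set j (cellValue input_grid i j))) out)
    ((List.range input_grid.length).map (fun _ => (List.range (input_grid.headD []).length).map (fun _ => (0 : Int))))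

-- ===== PORT B =====
-- port of Source B: early return on empty, column counts computed once, then one pass over the rows
def solve_alt (input_grid : List (List Int)) : List (List Int) :=
  if input_grid = [] then []
  else
    let m := (input_grid.headD []).length
    let cols := (List.range m).map (fun j =>
      input_grid.foldl (fun a row => if row.getD j 0 ≠ 0 then a + 1 else a) (0 : Int))
    input_grid.map (fun row =>
      let rc := row.foldl (fun a x => if x ≠ 0 then a + 1 else a) (0 : Int)
      (List.range m).map (fun j => rc + cols.getD j 0 - (if row.getD j 0 ≠ 0 then 1 else 0)))

-- ===== PRECONDITION & SPEC =====
-- Pre_ excludes only inputs on which the Python A raises IndexError: a (nonempty-grid) row shorter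
-- than the first row, whose missing column entries A indexes.
def Pre_solve (input_grid : List (List Int)) : Prop :=
  ∀ row ∈ input_grid, (input_grid.headD []).length ≤ row.length
instance (input_grid : List (List Int)) : Decidable (Pre_solve input_grid) := by unfold Pre_solve; infer_instance
def pvWitness_solve : List (List Int) := [[1, 0, 2], [0, 0, 5]]

def Spec_solve (input_grid : List (List Int)) (out : List (List Int)) : Prop := out = solve_alt input_grid
instance (input_grid : List (List Int)) (out : List (List Int)) : Decidable (Spec_solve input_grid out) := by unfold Spec_solve; infer_instance

-- ===== CLAIM (what is proved, stated in full; the proofs are below) =====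
def Claim_equal_solve : Prop := ∀ (input_grid : List (List Int)), Dom_solve input_grid → Pre_solve input_grid → Spec_solve input_grid (solve input_grid)

-- ===== LEMMAS AND PROOFS =====

theorem modify_modify {α : Type} (l : List α) (f g : α → α) (i : Nat) :
    (l.modify i f).modify i g = l.modify i (g ∘ f) := by
  apply List.ext_getElem?
  intro j
  simp only [List.getElem?_modify]
  split_ifs <;> simp [Function.comp_def]

theorem modify_id {α : Type} (l : List α) (i : Nat) : l.modify i (fun r => r) = l := by
  apply List.ext_getElem?
  intro j
  simp [List.getElem?_modify]

-- folding same-index modifies = one modify with the folded function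
theorem foldl_modify_comm {α : Type} (i : Nat) (φ : Nat → α → α) :
    ∀ (js : List Nat) (o : List α),
      js.foldl (fun o j => List.modify o i (φ j)) o
        = o.modify i (fun r => js.foldl (fun r j => φ j r) r) := by
  intro js
  induction js with
  | nil => intro o; simpa using (modify_id o i).symm
  | cons j js ih =>
      intro o
      simp only [List.foldl_cons, ih, modify_modify]
      rfl

-- filling positions 0..m-1 of a list by set, in order
theorem fill_sets {α : Type} (f : Nat → α) :
    ∀ (m : Nat) (r : List α), m ≤ r.length →
      (List.range m).foldl (fun r j => r.set j (f j)) r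
        = (List.range m).map f ++ r.drop m := by
  intro m
  induction m with
  | zero => intro r _; simp
  | succ m ih =>
      intro r h
      have hm : m < r.length := h
      rw [List.range_succ, List.foldl_append, ih r (Nat.le_of_lt hm)]
      simp only [List.foldl_cons, List.foldl_nil, List.map_append, List.map_cons, List.map_nil]
      rw [List.set_append]
      simp only [List.length_map, List.length_range]
      rw [if_neg (by omega)]
      rw [Nat.sub_self, List.drop_eq_getElem_cons hm, List.set_cons_zero]
      simp

-- filling rows 0..n-1 by modify, when every row satisfies P and the modifier is constant on P-rows
theorem fill_mods {α : Type} (P : α → Prop) [Inhabited α] (h : Nat → α → α) (w : Nat → α)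
    (hw : ∀ i r, P r → h i r = w i) :
    ∀ (n : Nat) (o : List α), n ≤ o.length → (∀ r ∈ o, P r) →
      (List.range n).foldl (fun o i => o.modify i (h i)) o
        = (List.range n).map w ++ o.drop n := by
  intro n
  induction n with
  | zero => intro o _ _; simp
  | succ n ih =>
      intro o hn hP
      have hlt : n < o.length := hn
      rw [List.range_succ, List.foldl_append, ih o (Nat.le_of_lt hlt) hP]
      simp only [List.foldl_cons, List.foldl_nil]
      have hrow : ((List.range n).map w ++ o.drop n)[n]? = some o[n] := by
        rw [List.getElem?_append_right (by simp)]
        simp [List.getElem?_drop]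
      rw [List.modify_eq_set (h n) n _, hrow]
      simp only [Option.getD_some]
      rw [hw n o[n] (hP _ (o.getElem_mem hlt))]
      rw [List.set_append]
      simp only [List.length_map, List.length_range]
      rw [if_neg (by omega)]
      rw [Nat.sub_self, List.drop_eq_getElem_cons hlt, List.set_cons_zero]
      simp [List.map_append]

-- A's result in closed form
theorem solve_eq (g : List (List Int)) :
    solve g = (List.range g.length).map (fun i =>
      (List.range (g.headD []).length).map (fun j => cellValue g i j)) := by
  unfold solve
  rw [show (fun (out : List (List Int)) (i : Nat) =>
        (List.range (g.headD []).length).foldl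
          (fun out j => out.modify i (fun r => r.set j (cellValue g i j))) out)
      = (fun (out : List (List Int)) (i : Nat) =>
        out.modify i (fun r =>
          (List.range (g.headD []).length).foldl (fun r j => r.set j (cellValue g i j)) r))
    from funext fun out => funext fun i =>
      foldl_modify_comm i (fun j r => r.set j (cellValue g i j)) _ out]
  rw [fill_mods (fun r : List Int => r.length = (g.headD []).length)
        (fun i r => (List.range (g.headD []).length).foldl (fun r j => r.set j (cellValue g i j)) r)
        (fun i => (List.range (g.headD []).length).map (fun j => cellValue g i j))
        (by
          intro i r hr
          dsimp only
          rw [fill_sets (fun j => cellValue g i j) _ r (le_of_eq hr.symm)]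
          simp [hr])
        g.length _ (by simp) (by intro r hr; simp at hr; obtain ⟨i, hi, rfl⟩ := hr; simp)]
  simp

-- the recomputed column count equals B's single fold over the grid
theorem col_count_eq (g : List (List Int)) (j : Nat) :
    countNonZero ((List.range g.length).map (fun x => (g.getD x []).getD j 0))
      = g.foldl (fun a row => if row.getD j 0 ≠ 0 then a + 1 else a) 0 := by
  have h : (List.range g.length).map (fun x => (g.getD x []).getD j 0)
      = g.map (fun row => row.getD j 0) := by
    apply List.ext_getElem (by simp)
    intro a h1 h2
    simp only [List.getElem_map, List.getElem_range]
    rw [List.getD_eq_getElem g [] (by simpa using h1)]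
  rw [h, countNonZero, List.foldl_map]

theorem solve_spec_aux (g : List (List Int)) : solve g = solve_alt g := by
  by_cases hg : g = []
  · subst hg
    simp [solve, solve_alt]
  · rw [solve_eq]
    unfold solve_alt
    rw [if_neg hg]
    apply List.ext_getElem (by simp)
    intro i h1 h2
    have hi : i < g.length := by simpa using h1
    simp only [List.getElem_map, List.getElem_range]
    apply List.map_congr_left
    intro j hj
    simp only [List.mem_range] at hj
    have hgi : g.getD i [] = g[i]'hi := List.getD_eq_getElem g [] hi
    simp only [cellValue, hgi]
    rw [col_count_eq]
    have hcols : ((List.range (g.headD []).length).map (fun j =>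
        g.foldl (fun a row => if row.getD j 0 ≠ 0 then a + 1 else a) (0 : Int))).getD j 0
        = g.foldl (fun a row => if row.getD j 0 ≠ 0 then a + 1 else a) (0 : Int) := by
      rw [List.getD_eq_getElem?_getD, List.getElem?_eq_getElem (by simpa using hj)]
      simp
    rw [hcols, countNonZero]

-- ===== VERDICT (by name: the statement is the Claim_ definition above) =====
theorem solve_spec : Claim_equal_solve := by
  intro g _ _
  exact solve_spec_aux g
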